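-- pv_equiv track=rewrite | github.com/noah-mclain/Jarvis-AI-Assistant | src/generative_ai_module/unified_dataset_handler.py | _extract_pairs_from_text
-- ===== SOURCE A (Python) =====
-- from typing import Dict, List, Any, Optional, Union, Tuple
--
-- def _extract_pairs_from_text(text: str, max_pairs: int) -> List[Dict[str, str]]:
--     """Extract prompt-response pairs from text format."""
--     pairs = []
--     parts = text.split("USER: ")
--
--     # Skip the first split which might be empty
--     for part in parts[1:]:
--         if "ASSISTANT: " not in part:
--             continue
--
--         user_text, assistant_text = part.split("ASSISTANT: ", 1)
--
--         # Handle multi-turn conversations by taking just the first response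
--         if "USER: " in assistant_text:
--             assistant_text = assistant_text.split("USER: ")[0]
--
--         pairs.append({
--             "prompt": user_text.strip(),
--             "response": assistant_text.strip()
--         })
--
--         if len(pairs) >= max_pairs:
--             break
--
--     return pairs
-- ===== SOURCE B (Python) =====
-- def _extract_pairs_from_text(text: str, max_pairs: int):
--     """Extract prompt-response pairs by a single index scan with str.find
--     (no intermediate split lists are built)."""
--     pairs = []
--     i = text.find("USER: ")
--     while i != -1:
--         start = i + 6
--         nxt = text.find("USER: ", start)          # start of the next segment (-1 = none)
--         a = text.find("ASSISTANT: ", start)       # first response marker at/after start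
--         if a != -1 and (nxt == -1 or a + 11 <= nxt):
--             end = len(text) if nxt == -1 else nxt
--             pairs.append({"prompt": text[start:a].strip(),
--                           "response": text[a + 11:end].strip()})
--             if len(pairs) >= max_pairs:
--                 break
--         i = nxt
--     return pairs
-- ===== Notes on version B (the rewrite author's own statement) =====
-- stated objective: alternative
-- what changed: Replaces A's nested split-on-'USER: '/split-on-'ASSISTANT: ' list building with a single index scan that walks the text with str.find and slices each prompt/response pair out directly.
import Mathlib
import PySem

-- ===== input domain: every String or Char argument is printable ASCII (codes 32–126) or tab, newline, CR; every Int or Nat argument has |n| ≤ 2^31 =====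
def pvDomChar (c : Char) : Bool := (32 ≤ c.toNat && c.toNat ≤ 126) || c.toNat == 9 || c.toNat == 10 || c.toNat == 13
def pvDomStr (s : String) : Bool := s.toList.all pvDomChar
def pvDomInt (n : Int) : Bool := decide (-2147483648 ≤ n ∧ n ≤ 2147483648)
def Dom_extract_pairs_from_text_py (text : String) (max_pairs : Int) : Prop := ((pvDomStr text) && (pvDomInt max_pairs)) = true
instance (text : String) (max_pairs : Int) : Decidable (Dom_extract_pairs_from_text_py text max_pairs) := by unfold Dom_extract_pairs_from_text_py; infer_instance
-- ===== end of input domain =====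

-- B replaces A's nested split-on-"USER: "/split-on-"ASSISTANT: " list building by a single
-- index scan of the text with str.find (objective: alternative, same asymptotic cost).

-- ===== PORT A =====
-- loop over parts[1:] with early break (Python 'for part in parts[1:]: … break')
def pvALoop : List (List Char) → Int → List (List (String × String)) → List (List (String × String))
  | [], _, pairs => pairs
  | part :: rest, max_pairs, pairs =>
    if PySem.Chars.isIn ("ASSISTANT: ".toList) part = false then
      pvALoop rest max_pairs pairs
    else
      let pieces := PySem.Chars.splitOnMax part ("ASSISTANT: ".toList) 1
      let user_text := pieces.getD 0 []
      let assistant_text := pieces.getD 1 []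
      let assistant_text := if PySem.Chars.isIn ("USER: ".toList) assistant_text then
          (PySem.Chars.splitOn assistant_text ("USER: ".toList)).getD 0 []
        else assistant_text
      let pairs := pairs ++ [[("prompt", String.ofList (PySem.Chars.strip user_text)),
                              ("response", String.ofList (PySem.Chars.strip assistant_text))]]
      if max_pairs ≤ (pairs.length : Int) then pairs else pvALoop rest max_pairs pairs

def extract_pairs_from_text_py (text : String) (max_pairs : Int) : List (List (String × String)) :=
  pvALoop ((PySem.Chars.splitOn text.toList ("USER: ".toList)).drop 1) max_pairs []

-- ===== PORT B =====
-- the 'while i != -1' scan of Source B; fuel = |text| + 1 only bounds the recursion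
-- (each iteration moves i forward by at least 6, so the fuel is never exhausted)
def pvBLoop (cs : List Char) (max_pairs : Int) : Nat → Int → List (List (String × String)) → List (List (String × String))
  | 0, _, pairs => pairs
  | fuel + 1, i, pairs =>
    if i = -1 then pairs else
      let start := i + 6
      let nxt := PySem.Chars.findFrom cs ("USER: ".toList) start none
      let a := PySem.Chars.findFrom cs ("ASSISTANT: ".toList) start none
      if a ≠ -1 ∧ (nxt = -1 ∨ a + 11 ≤ nxt) then
        let endi := if nxt = -1 then ((cs.length : Int)) else nxt
        let pairs := pairs ++ [[("prompt", String.ofList (PySem.Chars.strip (PySem.List.slice cs (some start) (some a)))),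
                                ("response", String.ofList (PySem.Chars.strip (PySem.List.slice cs (some (a + 11)) (some endi))))]]
        if max_pairs ≤ (pairs.length : Int) then pairs else pvBLoop cs max_pairs fuel nxt pairs
      else pvBLoop cs max_pairs fuel nxt pairs

def extract_pairs_from_text_py_alt (text : String) (max_pairs : Int) : List (List (String × String)) :=
  pvBLoop text.toList max_pairs (text.toList.length + 1) (PySem.Chars.find text.toList ("USER: ".toList)) []

-- ===== PRECONDITION & SPEC =====
def Spec_extract_pairs_from_text_py (text : String) (max_pairs : Int) (out : List (List (String × String))) : Prop := out = extract_pairs_from_text_py_alt text max_pairs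
instance (text : String) (max_pairs : Int) (out : List (List (String × String))) : Decidable (Spec_extract_pairs_from_text_py text max_pairs out) := by unfold Spec_extract_pairs_from_text_py; infer_instance

-- ===== CLAIM (what is proved, stated in full; the proofs are below) =====
def Claim_equal_extract_pairs_from_text_py : Prop := ∀ (text : String) (max_pairs : Int), Dom_extract_pairs_from_text_py text max_pairs → Spec_extract_pairs_from_text_py text max_pairs (extract_pairs_from_text_py text max_pairs)

-- ===== LEMMAS AND PROOFS =====

-- the two separators
def pvU : List Char := "USER: ".toList
def pvA : List Char := "ASSISTANT: ".toList

theorem pvU_ne : pvU ≠ [] := by decide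
theorem pvA_ne : pvA ≠ [] := by decide
theorem pvU_len : pvU.length = 6 := by decide
theorem pvA_len : pvA.length = 11 := by decide

-- find.go shifts its counter
theorem pv_find_go_shift (sub l : List Char) (k : Nat) :
    PySem.Chars.find.go sub l k =
      if PySem.Chars.find l sub = -1 then -1 else PySem.Chars.find l sub + k := by
  induction l generalizing k with
  | nil =>
    simp only [PySem.Chars.find, PySem.Chars.find.go]
    by_cases h : sub.isEmpty <;> simp [h]
  | cons c rest ih =>
    have h3 : -1 ≤ PySem.Chars.find rest sub := PySem.Chars.neg_one_le_find ..
    simp only [PySem.Chars.find] at h3 ⊢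
    simp only [PySem.Chars.find.go]
    by_cases h : sub.isPrefixOf (c :: rest) <;> simp only [h, if_true]
    · simp
    · rw [ih (k+1), ih 1]
      simp only [PySem.Chars.find]
      by_cases h2 : PySem.Chars.find.go sub rest 0 = -1 <;> simp [h2] <;> omega

theorem pv_find_nil (sep : List Char) (h : sep ≠ []) : PySem.Chars.find [] sep = -1 := by
  simp only [PySem.Chars.find, PySem.Chars.find.go]
  simp [List.isEmpty_iff, h]

theorem pv_find_cons (sub c rest) (h : sub.isPrefixOf (c :: rest) = false) :
    PySem.Chars.find (c :: rest) sub =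
      if PySem.Chars.find rest sub = -1 then -1 else PySem.Chars.find rest sub + 1 := by
  simp only [PySem.Chars.find, PySem.Chars.find.go, h]
  simp only [Bool.false_eq_true, if_false]
  rw [pv_find_go_shift]
  simp [PySem.Chars.find]

theorem pv_find_of_prefix (sub l : List Char) (h : sub.isPrefixOf l = true) :
    PySem.Chars.find l sub = 0 := by
  cases l with
  | nil =>
    have : sub = [] := by
      have := List.IsPrefix.length_le (List.isPrefixOf_iff_prefix.mp h)
      simpa using List.eq_nil_of_length_eq_zero (by simpa using this)
    simp [PySem.Chars.find, PySem.Chars.find.go, this]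
  | cons c rest => simp [PySem.Chars.find, PySem.Chars.find.go, h]

theorem pv_find_nonneg_of_ne (s sub : List Char) (h : PySem.Chars.find s sub ≠ -1) :
    0 ≤ PySem.Chars.find s sub := by
  have := PySem.Chars.neg_one_le_find (s := s) (sub := sub)
  omega

-- an occurrence fits inside the string
theorem pv_find_fit (s sub : List Char) (h : 0 ≤ PySem.Chars.find s sub) :
    (PySem.Chars.find s sub).toNat + sub.length ≤ s.length := by
  have hp := (PySem.Chars.find_spec h).1
  have := List.IsPrefix.length_le hp
  simp only [List.length_drop] at this
  have h2 : (PySem.Chars.find s sub) ≤ (s.length : Int) := PySem.Chars.find_le_length ..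
  omega

-- the split recursion that splitOn computes
def pvSplit (rem : List Char) : List (List Char) :=
  if h : PySem.Chars.find rem pvU = -1 then [rem]
  else
    rem.take (PySem.Chars.find rem pvU).toNat ::
      pvSplit (rem.drop ((PySem.Chars.find rem pvU).toNat + 6))
  termination_by rem.length
  decreasing_by
    have h0 : 0 ≤ PySem.Chars.find rem pvU := pv_find_nonneg_of_ne _ _ h
    have := pv_find_fit rem pvU h0
    rw [pvU_len] at this
    simp only [List.length_drop]
    omega

theorem pvSplit_ne_nil (l : List Char) : pvSplit l ≠ [] := by
  rw [pvSplit]; split <;> simp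

theorem pvSplit_head_tail (l : List Char) :
    (pvSplit l).headI :: (pvSplit l).tail = pvSplit l := by
  cases h : pvSplit l with
  | nil => exact absurd h (pvSplit_ne_nil l)
  | cons a t => simp

theorem pv_splitOn_go (fuel : Nat) (l cur : List Char) (acc : List (List Char))
    (hf : l.length + 1 ≤ fuel) :
    PySem.Chars.splitOn.go pvU fuel l cur acc =
      acc.reverse ++ ((cur.reverse ++ (pvSplit l).headI) :: (pvSplit l).tail) := by
  induction fuel generalizing l cur acc with
  | zero => omega
  | succ f ih =>
    cases l with
    | nil =>
      rw [pvSplit]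
      simp [PySem.Chars.splitOn.go, pv_find_nil _ pvU_ne]
    | cons c rest =>
      by_cases hp : pvU.isPrefixOf (c :: rest) = true
      · have hf0 : PySem.Chars.find (c :: rest) pvU = 0 := pv_find_of_prefix _ _ hp
        rw [pvSplit]
        simp only [hf0]
        norm_num
        simp only [PySem.Chars.splitOn.go, hp, if_true]
        rw [ih _ _ _ (by simp [pvU_len] at hf ⊢; omega)]
        rw [pvU_len]
        simp [pvSplit_head_tail]
      · have hps : pvU.isPrefixOf (c :: rest) = false := eq_false_of_ne_true hp
        have hcons := pv_find_cons pvU c rest hps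
        rw [show PySem.Chars.splitOn.go pvU (f+1) (c :: rest) cur acc
              = PySem.Chars.splitOn.go pvU f rest (c :: cur) acc from by
            simp [PySem.Chars.splitOn.go, hps]]
        rw [ih _ _ _ (by simp at hf ⊢; omega)]
        by_cases hr : PySem.Chars.find rest pvU = -1
        · have e1 : pvSplit rest = [rest] := by rw [pvSplit]; simp [hr]
          have e2 : pvSplit (c :: rest) = [c :: rest] := by rw [pvSplit]; simp [hcons, hr]
          simp [e1, e2]
        · have hr0 : 0 ≤ PySem.Chars.find rest pvU := pv_find_nonneg_of_ne _ _ hr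
          have hne : ¬ (PySem.Chars.find rest pvU + 1 = -1) := by omega
          have htn : (PySem.Chars.find rest pvU + 1).toNat
              = (PySem.Chars.find rest pvU).toNat + 1 := by omega
          have e1 : pvSplit rest
              = rest.take (PySem.Chars.find rest pvU).toNat ::
                pvSplit (rest.drop ((PySem.Chars.find rest pvU).toNat + 6)) := by
            rw [pvSplit]; simp [hr]
          have e2 : pvSplit (c :: rest)
              = (c :: rest.take (PySem.Chars.find rest pvU).toNat) ::
                pvSplit (rest.drop ((PySem.Chars.find rest pvU).toNat + 6)) := by
            rw [pvSplit]
            simp only [hcons, hr, if_false, hne, dite_false, htn]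
            simp [List.take_succ_cons, List.drop_succ_cons, Nat.add_right_comm]
          simp [e1, e2]

theorem pv_splitOn_eq (s : List Char) : PySem.Chars.splitOn s pvU = pvSplit s := by
  simp only [PySem.Chars.splitOn]
  rw [pv_splitOn_go _ _ _ _ (by omega)]
  simp [pvSplit_head_tail]

-- splitOnMax with maxsplit 0 / 1
theorem pv_splitOnMax_go_zero (sep : List Char) (fuel : Nat) (l cur : List Char) (acc : List (List Char)) :
    PySem.Chars.splitOnMax.go sep fuel 0 l cur acc = acc.reverse ++ [cur.reverse ++ l] := by
  cases fuel with
  | zero => simp [PySem.Chars.splitOnMax.go]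
  | succ f => cases l with
    | nil => simp [PySem.Chars.splitOnMax.go]
    | cons c rest => simp [PySem.Chars.splitOnMax.go]

theorem pv_splitOnMax_go_one (sep : List Char) (hs : sep ≠ []) (fuel : Nat) (l cur : List Char)
    (acc : List (List Char)) (hf : l.length + 1 ≤ fuel) :
    PySem.Chars.splitOnMax.go sep fuel 1 l cur acc =
      acc.reverse ++ (if PySem.Chars.find l sep = -1 then [cur.reverse ++ l]
        else [cur.reverse ++ l.take (PySem.Chars.find l sep).toNat,
              l.drop ((PySem.Chars.find l sep).toNat + sep.length)]) := by
  induction fuel generalizing l cur acc with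
  | zero => omega
  | succ f ih =>
    cases l with
    | nil => simp [PySem.Chars.splitOnMax.go, pv_find_nil _ hs]
    | cons c rest =>
      by_cases hp : sep.isPrefixOf (c :: rest) = true
      · have hf0 : PySem.Chars.find (c :: rest) sep = 0 := pv_find_of_prefix _ _ hp
        simp only [PySem.Chars.splitOnMax.go, hp, if_true]
        norm_num
        rw [pv_splitOnMax_go_zero]
        simp [hf0]
      · have hps : sep.isPrefixOf (c :: rest) = false := eq_false_of_ne_true hp
        have hcons := pv_find_cons sep c rest hps
        rw [show PySem.Chars.splitOnMax.go sep (f+1) 1 (c :: rest) cur acc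
              = PySem.Chars.splitOnMax.go sep f 1 rest (c :: cur) acc from by
            simp [PySem.Chars.splitOnMax.go, hps]]
        rw [ih _ _ _ (by simp at hf ⊢; omega)]
        by_cases hr : PySem.Chars.find rest sep = -1
        · simp [hcons, hr]
        · have hr0 : 0 ≤ PySem.Chars.find rest sep := pv_find_nonneg_of_ne _ _ hr
          have hne : ¬ (PySem.Chars.find rest sep + 1 = -1) := by omega
          have htn : (PySem.Chars.find rest sep + 1).toNat
              = (PySem.Chars.find rest sep).toNat + 1 := by omega
          simp only [hcons, hr, if_false, hne, htn]
          simp [List.take_succ_cons, List.drop_succ_cons, Nat.add_right_comm]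

theorem pv_splitOnMax_one (l sep : List Char) (hs : sep ≠ []) :
    PySem.Chars.splitOnMax l sep 1 =
      if PySem.Chars.find l sep = -1 then [l]
      else [l.take (PySem.Chars.find l sep).toNat,
            l.drop ((PySem.Chars.find l sep).toNat + sep.length)] := by
  simp only [PySem.Chars.splitOnMax]
  norm_num
  rw [pv_splitOnMax_go_one sep hs _ _ _ _ (by omega)]
  simp

-- the A-side pair built from one part
def pvPair (part : List Char) : List (String × String) :=
  [("prompt", String.ofList (PySem.Chars.strip (part.take (PySem.Chars.find part pvA).toNat))),
   ("response", String.ofList (PySem.Chars.strip (part.drop ((PySem.Chars.find part pvA).toNat + 11))))]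

-- the common scan both ports compute: rem is the text after some "USER: " occurrence
def pvScan (mp : Int) (rem : List Char) (acc : List (List (String × String))) :
    List (List (String × String)) :=
  if h : PySem.Chars.find rem pvU = -1 then
    if PySem.Chars.isIn pvA rem then acc ++ [pvPair rem] else acc
  else
    let part := rem.take (PySem.Chars.find rem pvU).toNat
    if PySem.Chars.isIn pvA part then
      let acc' := acc ++ [pvPair part]
      if mp ≤ (acc'.length : Int) then acc'
      else pvScan mp (rem.drop ((PySem.Chars.find rem pvU).toNat + 6)) acc'
    else pvScan mp (rem.drop ((PySem.Chars.find rem pvU).toNat + 6)) acc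
  termination_by rem.length
  decreasing_by
    all_goals
      have h0 : 0 ≤ PySem.Chars.find rem pvU := pv_find_nonneg_of_ne _ _ h
      have := pv_find_fit rem pvU h0
      rw [pvU_len] at this
      simp only [List.length_drop]
      omega

-- prefix at j inside a take K ↔ prefix at j that fits before K
theorem pv_prefix_take_drop_iff (sub rem : List Char) (K j : Nat) (hsub : sub ≠ []) :
    sub <+: (rem.take K).drop j ↔ (sub <+: rem.drop j ∧ j + sub.length ≤ K) := by
  rw [List.drop_take, List.prefix_take_iff]
  have h0 : 0 < sub.length := List.length_pos_of_ne_nil hsub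
  constructor
  · rintro ⟨h1, h2⟩; exact ⟨h1, by omega⟩
  · rintro ⟨h1, h2⟩; exact ⟨h1, by omega⟩

-- no "USER: " occurs inside the part cut at the first "USER: "
theorem pv_noU_take (rem : List Char) (h : PySem.Chars.find rem pvU ≠ -1) :
    PySem.Chars.isIn pvU (rem.take (PySem.Chars.find rem pvU).toNat) = false := by
  cases hI : PySem.Chars.isIn pvU (rem.take (PySem.Chars.find rem pvU).toNat) with
  | false => rfl
  | true =>
    exfalso
    obtain ⟨j, hj⟩ := (PySem.Chars.exists_prefix_drop_iff_isIn ..).mpr hI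
    rw [pv_prefix_take_drop_iff _ _ _ _ pvU_ne] at hj
    have hmin := (PySem.Chars.find_spec (pv_find_nonneg_of_ne _ _ h)).2
    exact hmin j (by have := hj.2; rw [pvU_len] at this; omega) hj.1

-- an infix of a U-free list is U-free
theorem pv_noU_drop (part : List Char) (m : Nat) (h : PySem.Chars.isIn pvU part = false) :
    PySem.Chars.isIn pvU (part.drop m) = false := by
  rw [PySem.Chars.isIn_eq_false_iff] at h ⊢
  intro hc
  exact h (hc.trans (List.drop_suffix m part).isInfix)

theorem pvBLoop_neg_one (cs : List Char) (mp : Int) (f : Nat)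
    (acc : List (List (String × String))) : pvBLoop cs mp f (-1) acc = acc := by
  cases f <;> simp [pvBLoop]

-- A's loop over pvSplit equals the common scan
theorem pv_lemma1 (mp : Int) (rem : List Char) (acc : List (List (String × String))) :
    pvALoop (pvSplit rem) mp acc = pvScan mp rem acc := by
  have H : ∀ (n : Nat) (rem : List Char) (acc : List (List (String × String))),
      rem.length ≤ n → pvALoop (pvSplit rem) mp acc = pvScan mp rem acc := by
    intro n
    induction n with
    | zero =>
      intro rem acc hn
      have hrem : rem = [] := List.eq_nil_of_length_eq_zero (by omega)
      subst hrem
      rw [pvSplit, pvScan]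
      simp only [pv_find_nil _ pvU_ne, dite_true]
      have hA : PySem.Chars.isIn pvA [] = false := by decide
      simp [pvALoop, hA, show ("ASSISTANT: ".toList) = pvA from rfl]
    | succ n ih =>
      intro rem acc hn
      by_cases hk : PySem.Chars.find rem pvU = -1
      · -- last segment: part = rem, no recursion
        have e1 : pvSplit rem = [rem] := by rw [pvSplit]; simp [hk]
        rw [e1, pvScan]
        simp only [hk, dite_true]
        simp only [pvALoop, show ("ASSISTANT: ".toList) = pvA from rfl,
          show ("USER: ".toList) = pvU from rfl]
        by_cases hA : PySem.Chars.isIn pvA rem = true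
        · have hfa : 0 ≤ PySem.Chars.find rem pvA :=
            (PySem.Chars.find_nonneg_iff ..).mpr ((PySem.Chars.isIn_iff_infix ..).mp hA)
          have hpieces := pv_splitOnMax_one rem pvA pvA_ne
          rw [if_neg (by omega)] at hpieces
          have hnoU : PySem.Chars.isIn pvU rem = false :=
            (PySem.Chars.isIn_eq_false_iff ..).mpr
              ((PySem.Chars.find_eq_neg_one_iff ..).mp hk)
          simp only [hA, Bool.true_eq_false, if_false, hpieces, pvA_len,
            List.getD_cons_zero, List.getD_cons_succ,
            pv_noU_drop _ _ hnoU, Bool.false_eq_true, if_false, pvPair]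
          split <;> simp [pvALoop]
        · rw [if_pos (eq_false_of_ne_true hA), if_neg hA]
      · -- inner segment: part = rem.take K, recurse on the rest
        have hk0 : 0 ≤ PySem.Chars.find rem pvU := pv_find_nonneg_of_ne _ _ hk
        have hfit := pv_find_fit rem pvU hk0
        rw [pvU_len] at hfit
        set K := (PySem.Chars.find rem pvU).toNat with hK
        have e1 : pvSplit rem = rem.take K :: pvSplit (rem.drop (K + 6)) := by
          rw [pvSplit]; simp only [hk, dite_false, ← hK]
        rw [e1, pvScan]
        simp only [hk, dite_false]
        simp only [pvALoop, show ("ASSISTANT: ".toList) = pvA from rfl,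
          show ("USER: ".toList) = pvU from rfl]
        have hrec : rem.length - (K + 6) ≤ n := by omega
        by_cases hA : PySem.Chars.isIn pvA (rem.take K) = true
        · have hfa : 0 ≤ PySem.Chars.find (rem.take K) pvA :=
            (PySem.Chars.find_nonneg_iff ..).mpr ((PySem.Chars.isIn_iff_infix ..).mp hA)
          have hpieces := pv_splitOnMax_one (rem.take K) pvA pvA_ne
          rw [if_neg (by omega)] at hpieces
          have hnoU : PySem.Chars.isIn pvU (rem.take K) = false := pv_noU_take rem hk
          simp only [hA, Bool.true_eq_false, if_false, hpieces, pvA_len,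
            List.getD_cons_zero, List.getD_cons_succ,
            pv_noU_drop _ _ hnoU, Bool.false_eq_true, if_false, pvPair]
          split
          · rfl
          · exact ih _ _ (by simp; omega)
        · rw [if_pos (eq_false_of_ne_true hA), if_neg hA]
          exact ih _ _ (by simp; omega)
  exact H rem.length rem acc le_rfl

-- "ASSISTANT: " occurs in (rem.take K) iff the first global occurrence fits before K
theorem pv_condA_iff (rem : List Char) (K : Nat) :
    PySem.Chars.isIn pvA (rem.take K) = true ↔
      (0 ≤ PySem.Chars.find rem pvA ∧ (PySem.Chars.find rem pvA).toNat + 11 ≤ K) := by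
  constructor
  · intro hI
    obtain ⟨j, hj⟩ := (PySem.Chars.exists_prefix_drop_iff_isIn ..).mpr hI
    rw [pv_prefix_take_drop_iff _ _ _ _ pvA_ne] at hj
    have hIn : PySem.Chars.isIn pvA rem = true :=
      (PySem.Chars.exists_prefix_drop_iff_isIn ..).mp ⟨j, hj.1⟩
    have hpos : 0 ≤ PySem.Chars.find rem pvA :=
      (PySem.Chars.find_nonneg_iff ..).mpr ((PySem.Chars.isIn_iff_infix ..).mp hIn)
    have hmin := (PySem.Chars.find_spec hpos).2
    have hle : (PySem.Chars.find rem pvA).toNat ≤ j := by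
      by_contra hlt
      exact hmin j (by omega) hj.1
    have := hj.2
    rw [pvA_len] at this
    exact ⟨hpos, by omega⟩
  · rintro ⟨hpos, hfit⟩
    have hp := (PySem.Chars.find_spec hpos).1
    apply (PySem.Chars.exists_prefix_drop_iff_isIn ..).mp
    exact ⟨(PySem.Chars.find rem pvA).toNat,
      (pv_prefix_take_drop_iff _ _ _ _ pvA_ne).mpr ⟨hp, by rw [pvA_len]; omega⟩⟩

theorem pv_find_take (rem : List Char) (K : Nat)
    (h1 : 0 ≤ PySem.Chars.find rem pvA) (h2 : (PySem.Chars.find rem pvA).toNat + 11 ≤ K) :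
    PySem.Chars.find (rem.take K) pvA = PySem.Chars.find rem pvA := by
  have hI : PySem.Chars.isIn pvA (rem.take K) = true :=
    (pv_condA_iff rem K).mpr ⟨h1, h2⟩
  have hbpos : 0 ≤ PySem.Chars.find (rem.take K) pvA :=
    (PySem.Chars.find_nonneg_iff ..).mpr ((PySem.Chars.isIn_iff_infix ..).mp hI)
  have hbspec := PySem.Chars.find_spec hbpos
  have hbp := (pv_prefix_take_drop_iff pvA rem K _ pvA_ne).mp hbspec.1
  have hamin := (PySem.Chars.find_spec h1).2
  have h3 : (PySem.Chars.find rem pvA).toNat ≤ (PySem.Chars.find (rem.take K) pvA).toNat := by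
    by_contra hlt
    exact hamin _ (by omega) hbp.1
  have haspec := (PySem.Chars.find_spec h1).1
  have hbmin := hbspec.2
  have h4 : (PySem.Chars.find (rem.take K) pvA).toNat ≤ (PySem.Chars.find rem pvA).toNat := by
    by_contra hlt
    exact hbmin _ (by omega)
      ((pv_prefix_take_drop_iff pvA rem K _ pvA_ne).mpr ⟨haspec, by rw [pvA_len]; omega⟩)
  omega

-- B's loop equals the common scan
theorem pv_lemma2 (cs : List Char) (mp : Int) (fuel i : Nat)
    (hi : i + 6 ≤ cs.length) (hf : cs.length - i < fuel)
    (acc : List (List (String × String))) :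
    pvBLoop cs mp fuel (i : Int) acc = pvScan mp (cs.drop (i + 6)) acc := by
  induction fuel generalizing i acc with
  | zero => omega
  | succ f ih =>
    simp only [pvBLoop]
    rw [if_neg (by omega : ¬ ((i : Int) = -1))]
    simp only [show ("USER: ".toList) = pvU from rfl, show ("ASSISTANT: ".toList) = pvA from rfl]
    rw [show ((i : Int) + 6) = ((i + 6 : Nat) : Int) from by push_cast; ring]
    rw [PySem.Chars.findFrom_natCast cs pvU (i+6) hi, PySem.Chars.findFrom_natCast cs pvA (i+6) hi]
    rw [pvScan]
    have hfk1 : -1 ≤ PySem.Chars.find (cs.drop (i+6)) pvU := PySem.Chars.neg_one_le_find ..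
    have hfa1 : -1 ≤ PySem.Chars.find (cs.drop (i+6)) pvA := PySem.Chars.neg_one_le_find ..
    set rem := cs.drop (i+6) with hrem
    set fk := PySem.Chars.find rem pvU with hfk
    set fa := PySem.Chars.find rem pvA with hfa
    have hlen : rem.length = cs.length - (i + 6) := by rw [hrem]; simp
    by_cases hk : fk = -1
    · rw [dif_pos hk]
      rw [if_pos hk]
      by_cases ha : fa = -1
      · rw [if_neg (by simp [ha])]
        rw [if_neg (by
          rw [(PySem.Chars.isIn_eq_false_iff ..).mpr
            ((PySem.Chars.find_eq_neg_one_iff ..).mp (hfa ▸ ha))]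
          simp)]
        exact pvBLoop_neg_one cs mp f acc
      · have ha0 : 0 ≤ fa := by omega
        rw [if_neg ha]
        rw [if_pos (by
          refine ⟨by omega, Or.inl rfl⟩)]
        rw [if_pos ((PySem.Chars.isIn_iff_infix ..).mpr
          ((PySem.Chars.find_nonneg_iff ..).mp (hfa ▸ ha0)))]
        rw [show (if (-1 : Int) = -1 then ((cs.length : Int)) else (-1 : Int))
              = ((cs.length : Int)) from if_pos rfl]
        have e1 : PySem.List.slice cs (some ((i + 6 : Nat) : Int))
            (some (((i + 6 : Nat) : Int) + fa)) = rem.take fa.toNat := by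
          rw [show (((i + 6 : Nat) : Int) + fa) = ((i + 6 + fa.toNat : Nat) : Int) from by
            push_cast; omega]
          rw [PySem.List.slice_natCast, hrem]
          congr 1 <;> omega
        have e2 : PySem.List.slice cs (some (((i + 6 : Nat) : Int) + fa + 11))
            (some ((cs.length : Int))) = rem.drop (fa.toNat + 11) := by
          rw [show (((i + 6 : Nat) : Int) + fa + 11) = ((i + 6 + fa.toNat + 11 : Nat) : Int) from by
            push_cast; omega]
          rw [show ((cs.length : Int)) = ((cs.length : Nat) : Int) from rfl]
          rw [PySem.List.slice_natCast, hrem, List.drop_drop]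
          rw [List.take_of_length_le (by simp)]
          congr 1 <;> omega
        rw [e1, e2, pvPair]
        rw [← hfa]
        split
        · rfl
        · exact pvBLoop_neg_one ..
    · have hk0 : 0 ≤ fk := by omega
      have hKfit := pv_find_fit rem pvU (hfk ▸ hk0)
      rw [pvU_len, ← hfk] at hKfit
      rw [dif_neg hk, if_neg hk]
      have hrec1 : (i + 6 + fk.toNat) + 6 ≤ cs.length := by omega
      have hrec2 : cs.length - (i + 6 + fk.toNat) < f := by omega
      have hnxtc : ((i + 6 : Nat) : Int) + fk = ((i + 6 + fk.toNat : Nat) : Int) := by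
        push_cast; omega
      have hdrop : rem.drop (fk.toNat + 6) = cs.drop ((i + 6 + fk.toNat) + 6) := by
        rw [hrem, List.drop_drop]; congr 1 <;> omega
      have hca := pv_condA_iff rem fk.toNat
      rw [← hfa] at hca
      by_cases ha : fa = -1
      · have hisin : PySem.Chars.isIn pvA (rem.take fk.toNat) = false :=
          eq_false_of_ne_true (fun hI => by have := hca.mp hI; omega)
        rw [if_neg (by rintro ⟨h1, h2⟩; exact h1 (by simp [ha]))]
        rw [if_neg (by simp [hisin])]
        rw [hnxtc, ih (i + 6 + fk.toNat) hrec1 hrec2 acc, hdrop]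
      · have ha0 : 0 ≤ fa := by omega
        rw [if_neg ha]
        by_cases hfit2 : fa + 11 ≤ fk
        · have hisin : PySem.Chars.isIn pvA (rem.take fk.toNat) = true :=
            hca.mpr ⟨ha0, by omega⟩
          rw [if_pos (by
            refine ⟨by omega, Or.inr (by omega)⟩)]
          rw [if_pos hisin]
          rw [if_neg (by omega : ¬ (((i + 6 : Nat) : Int) + fk = -1))]
          have hfind := pv_find_take rem fk.toNat (hfa ▸ ha0) (by rw [← hfa]; omega)
          rw [← hfa] at hfind
          have e1 : PySem.List.slice cs (some ((i + 6 : Nat) : Int))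
              (some (((i + 6 : Nat) : Int) + fa)) = (rem.take fk.toNat).take ((PySem.Chars.find (rem.take fk.toNat) pvA).toNat) := by
            rw [hfind]
            rw [show (((i + 6 : Nat) : Int) + fa) = ((i + 6 + fa.toNat : Nat) : Int) from by
              push_cast; omega]
            rw [PySem.List.slice_natCast, hrem, List.take_take]
            rw [min_eq_left (by omega)]
            congr 1 <;> omega
          have e2 : PySem.List.slice cs (some (((i + 6 : Nat) : Int) + fa + 11))
              (some (((i + 6 : Nat) : Int) + fk)) = (rem.take fk.toNat).drop ((PySem.Chars.find (rem.take fk.toNat) pvA).toNat + 11) := by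
            rw [hfind]
            rw [show (((i + 6 : Nat) : Int) + fa + 11) = ((i + 6 + fa.toNat + 11 : Nat) : Int) from by
              push_cast; omega]
            rw [hnxtc]
            rw [PySem.List.slice_natCast, hrem, List.drop_take, List.drop_drop]
            congr 1 <;> omega
          rw [e1, e2, pvPair]
          dsimp only
          split
          · rfl
          · rw [hnxtc, ih (i + 6 + fk.toNat) hrec1 hrec2 _, hdrop]
        · have hisin : PySem.Chars.isIn pvA (rem.take fk.toNat) = false :=
            (Bool.not_eq_true _).mp (fun hI => by have := hca.mp hI; omega)
          rw [if_neg (by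
            rintro ⟨h1, h2⟩
            rcases h2 with h2 | h2
            · omega
            · omega)]
          rw [if_neg (by simp [hisin])]
          rw [hnxtc, ih (i + 6 + fk.toNat) hrec1 hrec2 acc, hdrop]

-- ===== VERDICT (by name: the statement is the Claim_ definition above) =====
theorem extract_pairs_from_text_py_spec : Claim_equal_extract_pairs_from_text_py := by
  intro text mp _
  unfold Spec_extract_pairs_from_text_py extract_pairs_from_text_py extract_pairs_from_text_py_alt
  simp only [show ("USER: ".toList) = pvU from rfl]
  rw [pv_splitOn_eq]
  by_cases hk : PySem.Chars.find text.toList pvU = -1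
  · have e1 : pvSplit text.toList = [text.toList] := by rw [pvSplit]; simp [hk]
    rw [e1, hk, pvBLoop_neg_one]
    simp [pvALoop]
  · have hk0 := pv_find_nonneg_of_ne _ _ hk
    have hfit := pv_find_fit text.toList pvU hk0
    rw [pvU_len] at hfit
    have e1 : pvSplit text.toList
        = text.toList.take (PySem.Chars.find text.toList pvU).toNat ::
          pvSplit (text.toList.drop ((PySem.Chars.find text.toList pvU).toNat + 6)) := by
      rw [pvSplit]; simp [hk]
    rw [e1]
    rw [show ∀ (x : List Char) (L : List (List Char)), List.drop 1 (x :: L) = L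
          from fun _ _ => rfl]
    rw [pv_lemma1]
    have h2 := pv_lemma2 text.toList mp (text.toList.length + 1)
      (PySem.Chars.find text.toList pvU).toNat (by omega) (by omega) []
    rw [Int.toNat_of_nonneg hk0] at h2
    rw [h2]
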